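-- pv_equiv track=rewrite | github.com/SylvainWOZNY/TIPE | Modelisation.py | verif_equilibre_matrice
-- ===== SOURCE A (Python) =====
-- def verif_equilibre_matrice (matrice):
--     '''
--     Permet de vérifier si une matrice est équilibrée
--     -------------------------------------------------
--     matrice : matrice de relation entre les piles
--     '''
--
--     res = True
--     for i in range(0,len(matrice)):
--         si=0
--         sj=0
--         for j in range (0,len(matrice)):
--             si = si+ matrice[i][j]
--             sj = sj+ matrice[j][i]
--         if sj != si :
--             res= False
--     return res
-- ===== SOURCE B (Python) =====
-- def verif_equilibre_matrice(matrice):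
--     n = len(matrice)
--     diff = [0] * n
--     for i in range(n):
--         for j in range(n):
--             x = matrice[i][j]
--             diff[i] += x
--             diff[j] -= x
--     return all(d == 0 for d in diff)
-- ===== Notes on version B (the rewrite author's own statement) =====
-- stated objective: alternative
-- what changed: Instead of comparing a row sum with a separately-scanned column sum at each index, B makes one row-major pass over the cells maintaining a single difference vector (each cell x=m[i][j] does diff[i]+=x; diff[j]-=x) and checks that all differences are zero, so no column-wise traversal exists at all.
import Mathlib
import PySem

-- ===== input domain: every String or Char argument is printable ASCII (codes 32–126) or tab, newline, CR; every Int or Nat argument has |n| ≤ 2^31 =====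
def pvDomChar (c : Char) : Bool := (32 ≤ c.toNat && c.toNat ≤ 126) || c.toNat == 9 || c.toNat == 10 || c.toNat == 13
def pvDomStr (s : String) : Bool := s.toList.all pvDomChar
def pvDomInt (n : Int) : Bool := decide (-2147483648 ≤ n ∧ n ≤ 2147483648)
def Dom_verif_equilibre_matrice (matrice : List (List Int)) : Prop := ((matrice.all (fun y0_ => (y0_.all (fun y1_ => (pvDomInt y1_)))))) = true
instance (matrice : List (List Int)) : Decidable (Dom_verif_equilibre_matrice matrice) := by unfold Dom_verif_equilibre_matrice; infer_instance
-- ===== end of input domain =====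

-- B replaces A's per-index row-scan + column-scan comparison by a single row-major pass that
-- maintains a difference vector (diff[i] += x; diff[j] -= x per cell) checked against zero
-- (objective: alternative algorithm; same asymptotic cost).


-- ===== PORT A =====
-- shared accessor: matrice[a][b] (total form; Pre_ keeps indices in range)
def pvAt (m : List (List Int)) (a b : Int) : Int :=
  PySem.List.pyGetD ((PySem.List.pyGet? m a).getD []) b 0

def verif_equilibre_matrice (matrice : List (List Int)) : Bool :=
  (PySem.List.pyRange 0 (PySem.List.len matrice) 1).foldl (fun res i =>
    let s := (PySem.List.pyRange 0 (PySem.List.len matrice) 1).foldl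
      (fun (s : Int × Int) j => (s.1 + pvAt matrice i j, s.2 + pvAt matrice j i)) (0, 0)
    if s.2 != s.1 then false else res) true

-- ===== PORT B =====
def verif_equilibre_matrice_alt (matrice : List (List Int)) : Bool :=
  let n : Int := PySem.List.len matrice
  let diff0 : List Int := List.replicate n.toNat 0
  let diff := (PySem.List.pyRange 0 n 1).foldl (fun diff i =>
    (PySem.List.pyRange 0 n 1).foldl (fun diff j =>
      let x := pvAt matrice i j
      let diff := PySem.List.pySetD diff i (PySem.List.pyGetD diff i 0 + x)
      PySem.List.pySetD diff j (PySem.List.pyGetD diff j 0 - x)) diff) diff0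
  diff.all (fun d => d == 0)

-- ===== PRECONDITION & SPEC =====
-- Pre_: exactly where the Python A returns — every row must have at least len(matrice)
-- entries, otherwise matrice[i][j] / matrice[j][i] raises IndexError (in both A and B).
def Pre_verif_equilibre_matrice (matrice : List (List Int)) : Prop :=
  ∀ row ∈ matrice, matrice.length ≤ row.length
instance (matrice : List (List Int)) : Decidable (Pre_verif_equilibre_matrice matrice) := by
  unfold Pre_verif_equilibre_matrice; infer_instance
def pvWitness_verif_equilibre_matrice : List (List Int) := [[1, 2], [2, 1]]
def Spec_verif_equilibre_matrice (matrice : List (List Int)) (out : Bool) : Prop := out = verif_equilibre_matrice_alt matrice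
instance (matrice : List (List Int)) (out : Bool) : Decidable (Spec_verif_equilibre_matrice matrice out) := by unfold Spec_verif_equilibre_matrice; infer_instance

-- ===== CLAIM (what is proved, stated in full; the proofs are below) =====
def Claim_equal_verif_equilibre_matrice : Prop := ∀ (matrice : List (List Int)), Dom_verif_equilibre_matrice matrice → Pre_verif_equilibre_matrice matrice → Spec_verif_equilibre_matrice matrice (verif_equilibre_matrice matrice)

-- ===== LEMMAS AND PROOFS =====

-- per-index row/column sums of the index table, as both characterisations reach them
def pvRow (m : List (List Int)) (i : Nat) : Int :=
  ((List.range m.length).map (fun (j : Nat) => pvAt m ↑i ↑j)).sum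
def pvCol (m : List (List Int)) (i : Nat) : Int :=
  ((List.range m.length).map (fun (j : Nat) => pvAt m ↑j ↑i)).sum

-- the interleaved (si, sj) loop is the pair of its two sums
theorem pv_inner_fold_A (m : List (List Int)) (i : Nat) (l : List Nat) (a b : Int) :
    l.foldl (fun (s : Int × Int) (j : Nat) => (s.1 + pvAt m ↑i ↑j, s.2 + pvAt m ↑j ↑i)) (a, b)
      = (a + (l.map (fun (j : Nat) => pvAt m ↑i ↑j)).sum,
         b + (l.map (fun (j : Nat) => pvAt m ↑j ↑i)).sum) := by
  rw [PySem.List.foldl_prod_mk (f := fun (s : Int) (j : Nat) => s + pvAt m ↑i ↑j)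
        (g := fun (s : Int) (j : Nat) => s + pvAt m ↑j ↑i),
      PySem.List.foldl_add l (fun j => pvAt m ↑i ↑j) a,
      PySem.List.foldl_add l (fun j => pvAt m ↑j ↑i) b]

theorem pv_A_char (m : List (List Int)) :
    verif_equilibre_matrice m
      = !((List.range m.length).any (fun (i : Nat) => pvCol m i != pvRow m i)) := by
  unfold verif_equilibre_matrice
  simp only [PySem.List.len_eq, PySem.List.pyRange_zero_natCast, List.foldl_map]
  rw [PySem.List.foldl_if_false_eq (p := fun (i : Nat) =>
      (((List.range m.length).foldl
        (fun (s : Int × Int) (j : Nat) => (s.1 + pvAt m ↑i ↑j, s.2 + pvAt m ↑j ↑i)) (0, 0)).2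
      != ((List.range m.length).foldl
        (fun (s : Int × Int) (j : Nat) => (s.1 + pvAt m ↑i ↑j, s.2 + pvAt m ↑j ↑i)) (0, 0)).1))]
  simp only [pv_inner_fold_A, zero_add, Bool.true_and, pvRow, pvCol]

-- one cell update of B's pass, at Nat indices
def pvCell (m : List (List Int)) (i : Nat) (d : List Int) (j : Nat) : List Int :=
  let x := pvAt m ↑i ↑j
  let d1 := d.set i (d.getD i 0 + x)
  d1.set j (d1.getD j 0 - x)

theorem pv_B_unfold (m : List (List Int)) :
    verif_equilibre_matrice_alt m
      = (((List.range m.length).foldl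
            (fun d i => (List.range m.length).foldl (pvCell m i) d)
            (List.replicate m.length 0)).all (fun d => d == 0)) := by
  unfold verif_equilibre_matrice_alt pvCell
  simp only [PySem.List.len_eq, PySem.List.pyRange_zero_natCast, List.foldl_map,
    PySem.List.pySetD_natCast, PySem.List.pyGetD_natCast, Int.toNat_natCast]

theorem pv_length_cell (m : List (List Int)) (i : Nat) (d : List Int) (j : Nat) :
    (pvCell m i d j).length = d.length := by
  simp [pvCell]

theorem pv_length_fold (m : List (List Int)) (i : Nat) (l : List Nat) (d : List Int) :
    (l.foldl (pvCell m i) d).length = d.length := by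
  induction l generalizing d with
  | nil => rfl
  | cons j t ih => simp [List.foldl_cons, ih, pv_length_cell]

theorem pv_getD_set (d : List Int) (i k : Nat) (v : Int) (hi : i < d.length) :
    (d.set i v).getD k 0 = if k = i then v else d.getD k 0 := by
  rcases Nat.lt_or_ge k d.length with hk | hk
  · rw [List.getD_eq_getElem _ _ (by simpa using hk),
      List.getElem_set]
    by_cases h : k = i
    · simp [h]
    · have h' : ¬ i = k := fun hh => h hh.symm
      simp only [if_neg h, if_neg h']
      rw [List.getD_eq_getElem _ _ hk]
  · have h : k ≠ i := by omega
    rw [List.getD_eq_default _ _ (by simpa using hk),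
      List.getD_eq_default _ _ (by simpa using hk)]
    simp [h]

theorem pv_getD_cell (m : List (List Int)) (i : Nat) (d : List Int) (j k : Nat)
    (hi : i < d.length) (hj : j < d.length) :
    (pvCell m i d j).getD k 0
      = d.getD k 0 + (if k = i then pvAt m ↑i ↑j else 0)
        - (if k = j then pvAt m ↑i ↑j else 0) := by
  unfold pvCell
  rw [pv_getD_set _ _ _ _ (by simpa using hj), pv_getD_set _ _ _ _ hi,
    pv_getD_set _ _ _ _ hi]
  by_cases hkj : k = j
  · subst hkj
    by_cases hki : k = i
    · subst hki; simp
    · simp [hki]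
  · by_cases hki : k = i
    · subst hki; simp [fun h : k = j => hkj h]
    · simp [hkj, hki]

theorem pv_inner_fold_B (m : List (List Int)) (i : Nat) (l : List Nat) (d : List Int) (k : Nat)
    (hi : i < d.length) (hk : k < d.length) (hl : ∀ j ∈ l, j < d.length) :
    (l.foldl (pvCell m i) d).getD k 0
      = d.getD k 0 + (if k = i then (l.map (fun (j : Nat) => pvAt m ↑i ↑j)).sum else 0)
        - (l.count k : Int) * pvAt m ↑i ↑k := by
  induction l generalizing d with
  | nil => simp
  | cons j t ih =>
    have hj : j < d.length := hl j (by simp)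
    rw [List.foldl_cons, ih (pvCell m i d j) (by rwa [pv_length_cell])
        (by rwa [pv_length_cell]) (fun x hx => by rw [pv_length_cell]; exact hl x (by simp [hx])),
      pv_getD_cell m i d j k hi hj]
    rw [List.count_cons]
    by_cases hkj : k = j
    · subst hkj
      by_cases hki : k = i
      · subst hki
        simp only [List.map_cons, List.sum_cons]
        push_cast [beq_iff_eq, if_pos rfl]
        ring
      · simp only [if_neg hki]
        push_cast [beq_iff_eq, if_pos rfl]
        ring
    · have hjk : ¬ j = k := fun h => hkj h.symm
      by_cases hki : k = i
      · subst hki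
        simp only [if_neg hkj, List.map_cons, List.sum_cons]
        push_cast [beq_iff_eq, if_neg hjk]
        ring
      · simp only [if_neg hkj, if_neg hki]
        push_cast [beq_iff_eq, if_neg hjk]
        ring

theorem pv_outer_fold_B (m : List (List Int)) (li : List Nat) (d : List Int) (k : Nat)
    (hd : d.length = m.length) (hk : k < m.length) (hl : ∀ i ∈ li, i < m.length) :
    (li.foldl (fun d i => (List.range m.length).foldl (pvCell m i) d) d).getD k 0
      = d.getD k 0 + (li.count k : Int) * pvRow m k
        - (li.map (fun (i : Nat) => pvAt m ↑i ↑k)).sum := by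
  induction li generalizing d with
  | nil => simp
  | cons i t ih =>
    have hi : i < m.length := hl i (by simp)
    rw [List.foldl_cons,
      ih ((List.range m.length).foldl (pvCell m i) d)
        (by rw [pv_length_fold]; exact hd)
        (fun x hx => hl x (by simp [hx])),
      pv_inner_fold_B m i (List.range m.length) d k (hd ▸ hi) (hd ▸ hk)
        (fun j hj => by rw [hd]; exact List.mem_range.mp hj)]
    rw [List.count_cons, List.count_range, if_pos hk]
    by_cases hki : k = i
    · subst hki
      simp only [pvRow, List.map_cons, List.sum_cons]
      push_cast [beq_iff_eq, if_pos rfl]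
      ring
    · have hik : ¬ i = k := fun h => hki h.symm
      simp only [if_neg hki, pvRow, List.map_cons, List.sum_cons]
      push_cast [beq_iff_eq, if_neg hik]
      ring

theorem pv_length_outer (m : List (List Int)) (li : List Nat) (d : List Int) :
    (li.foldl (fun d i => (List.range m.length).foldl (pvCell m i) d) d).length = d.length := by
  induction li generalizing d with
  | nil => rfl
  | cons i t ih => simp [List.foldl_cons, ih, pv_length_fold]

theorem pv_B_char (m : List (List Int)) :
    verif_equilibre_matrice_alt m
      = ((List.range m.length).all (fun (k : Nat) => pvRow m k - pvCol m k == 0)) := by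
  rw [pv_B_unfold]
  have hlen : ((List.range m.length).foldl
      (fun d i => (List.range m.length).foldl (pvCell m i) d)
      (List.replicate m.length 0)).length = m.length := by
    rw [pv_length_outer]; simp
  have hget : ∀ k, k < m.length →
      ((List.range m.length).foldl
        (fun d i => (List.range m.length).foldl (pvCell m i) d)
        (List.replicate m.length 0)).getD k 0 = pvRow m k - pvCol m k := by
    intro k hk
    rw [pv_outer_fold_B m (List.range m.length) _ k (by simp) hk
      (fun i hi => List.mem_range.mp hi)]
    simp [List.count_range, hk, pvCol]
  rw [Bool.eq_iff_iff]
  simp only [List.all_eq_true, List.mem_range, beq_iff_eq]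
  constructor
  · intro h k hk
    rw [← hget k hk, List.getD_eq_getElem _ _ (by omega)]
    exact h _ (List.getElem_mem _)
  · intro h x hx
    obtain ⟨k, hk, rfl⟩ := List.mem_iff_getElem.mp hx
    rw [← List.getD_eq_getElem _ 0 hk, hget k (hlen ▸ hk)]
    exact h k (hlen ▸ hk)

-- ===== VERDICT (by name: the statement is the Claim_ definition above) =====
theorem verif_equilibre_matrice_spec : Claim_equal_verif_equilibre_matrice := by
  intro m _ _
  unfold Spec_verif_equilibre_matrice
  rw [pv_A_char, pv_B_char, Bool.eq_iff_iff]
  simp only [Bool.not_eq_eq_eq_not, Bool.not_true, List.any_eq_false, List.all_eq_true,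
    bne_iff_ne, ne_eq, not_not, beq_iff_eq, List.mem_range, sub_eq_zero]
  constructor
  · intro h k hk; exact (h k hk).symm
  · intro h k hk; exact (h k hk).symm
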